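-- pv_equiv track=rewrite | github.com/syuaibsyuaib/RAGP5 | RAGP/ragp_loop.py | _parse_sensors
-- ===== SOURCE A (Python) =====
-- PRIORITAS_STIMULUS = [104, 1, 103, 100]
--
-- KONTEKS_NODES = {101, 102, 105}
--
-- def _parse_sensors(sensors: list[int]) -> tuple[int | None, list[int]]:
--     stimulus = None
--     context: list[int] = []
--
--     for p in PRIORITAS_STIMULUS:
--         if p in sensors:
--             stimulus = p
--             break
--
--     for s in sensors:
--         if s in KONTEKS_NODES:
--             context.append(s)
--
--     return stimulus, context
-- ===== SOURCE B (Python) =====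
-- PRIORITAS_STIMULUS = [104, 1, 103, 100]
--
-- KONTEKS_NODES = {101, 102, 105}
--
-- _RANK = {p: i for i, p in enumerate(PRIORITAS_STIMULUS)}
--
-- def _parse_sensors(sensors):
--     # One pass: track the minimum priority rank seen (argmin of a rank
--     # function) and collect context nodes; then index the priority list.
--     n = len(PRIORITAS_STIMULUS)
--     best = n
--     context = []
--     for s in sensors:
--         r = _RANK.get(s, n)
--         if r < best:
--             best = r
--         if s in KONTEKS_NODES:
--             context.append(s)
--     stimulus = PRIORITAS_STIMULUS[best] if best < n else None
--     return stimulus, context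
-- ===== Notes on version B (the rewrite author's own statement) =====
-- stated objective: alternative
-- what changed: B replaces A's per-priority membership scans with a one-pass argmin of a rank function (each sensor mapped to its index in the priority list via a dict, tracking the minimum rank) followed by a single index into the priority list, collecting context in the same pass.
import Mathlib
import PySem

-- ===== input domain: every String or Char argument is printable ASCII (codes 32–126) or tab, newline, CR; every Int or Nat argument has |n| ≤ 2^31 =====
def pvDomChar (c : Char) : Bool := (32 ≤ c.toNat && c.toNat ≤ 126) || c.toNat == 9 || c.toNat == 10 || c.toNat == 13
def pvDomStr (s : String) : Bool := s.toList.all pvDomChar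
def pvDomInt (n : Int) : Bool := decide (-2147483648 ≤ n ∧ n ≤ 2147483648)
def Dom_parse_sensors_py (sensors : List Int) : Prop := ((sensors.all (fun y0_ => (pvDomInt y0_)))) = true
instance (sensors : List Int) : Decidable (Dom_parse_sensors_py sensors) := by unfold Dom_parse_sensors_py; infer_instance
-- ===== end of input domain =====

-- B computes the stimulus as the argmin of a priority-rank function in one pass (also collecting
-- context), then indexes the priority list — replacing A's per-priority scans (objective: alternative).


-- ===== PORT A =====
-- PRIORITAS_STIMULUS = [104, 1, 103, 100]
def pvPrioritas : List Int := [104, 1, 103, 100]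

-- 'for p in PRIORITAS_STIMULUS: if p in sensors: stimulus = p; break'
def pvFindStimulus : List Int → List Int → Option Int
  | [], _ => none
  | p :: ps, sensors => if p ∈ sensors then some p else pvFindStimulus ps sensors

def parse_sensors_py (sensors : List Int) : Option Int × List Int :=
  let stimulus := pvFindStimulus pvPrioritas sensors
  -- 'for s in sensors: if s in KONTEKS_NODES: context.append(s)'
  let context := sensors.foldl
    (fun acc s => if s = 101 ∨ s = 102 ∨ s = 105 then acc ++ [s] else acc) []
  (stimulus, context)

-- ===== PORT B =====
-- _RANK.get(s, 4): index of s in PRIORITAS_STIMULUS, else 4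
def pvRank (s : Int) : Int :=
  if s = 104 then 0 else if s = 1 then 1 else if s = 103 then 2 else if s = 100 then 3 else 4

def parse_sensors_py_alt (sensors : List Int) : Option Int × List Int :=
  let st := sensors.foldl
    (fun (acc : Int × List Int) s =>
      let r := pvRank s
      ((if r < acc.1 then r else acc.1),
       if s = 101 ∨ s = 102 ∨ s = 105 then acc.2 ++ [s] else acc.2))
    (4, [])
  let stimulus := if st.1 < 4 then PySem.List.pyGet? pvPrioritas st.1 else none
  (stimulus, st.2)

-- ===== PRECONDITION & SPEC =====
def Spec_parse_sensors_py (sensors : List Int) (out : Option Int × List Int) : Prop := out = parse_sensors_py_alt sensors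
instance (sensors : List Int) (out : Option Int × List Int) : Decidable (Spec_parse_sensors_py sensors out) := by unfold Spec_parse_sensors_py; infer_instance

-- ===== CLAIM =====
def Claim_equal_parse_sensors_py : Prop := ∀ (sensors : List Int), Dom_parse_sensors_py sensors → Spec_parse_sensors_py sensors (parse_sensors_py sensors)

-- ===== LEMMAS AND PROOFS =====

-- B's fold splits into two independent folds.
theorem pvPairFold_split (l : List Int) (b : Int) (c : List Int) :
    (l.foldl
      (fun (acc : Int × List Int) s =>
        let r := pvRank s
        ((if r < acc.1 then r else acc.1),
         if s = 101 ∨ s = 102 ∨ s = 105 then acc.2 ++ [s] else acc.2))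
      (b, c))
    = (l.foldl (fun b s => if pvRank s < b then pvRank s else b) b,
       l.foldl (fun acc s => if s = 101 ∨ s = 102 ∨ s = 105 then acc ++ [s] else acc) c) := by
  induction l generalizing b c with
  | nil => rfl
  | cons s rest ih => simp only [List.foldl]; exact ih _ _

-- characterization of the running-minimum fold
theorem pvMinFold_le (l : List Int) (b k : Int) :
    (l.foldl (fun b s => if pvRank s < b then pvRank s else b) b ≤ k)
    ↔ (b ≤ k ∨ ∃ s ∈ l, pvRank s ≤ k) := by
  induction l generalizing b with
  | nil => simp
  | cons s rest ih =>
    simp only [List.foldl, ih, List.mem_cons]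
    constructor
    · rintro (h | ⟨t, ht, hr⟩)
      · split_ifs at h with hc
        · exact Or.inr ⟨s, Or.inl rfl, h⟩
        · exact Or.inl h
      · exact Or.inr ⟨t, Or.inr ht, hr⟩
    · rintro (h | ⟨t, ht, hr⟩)
      · left; split_ifs with hc <;> omega
      · rcases ht with rfl | ht
        · left; split_ifs with hc <;> omega
        · exact Or.inr ⟨t, ht, hr⟩

theorem pvRank_nonneg (s : Int) : 0 ≤ pvRank s := by
  unfold pvRank; split_ifs <;> omega

theorem pvRank_le0 (s : Int) (h : pvRank s ≤ 0) : s = 104 := by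
  unfold pvRank at h; split_ifs at h <;> first | tauto | omega

theorem pvRank_le1 (s : Int) (h : pvRank s ≤ 1) : s = 104 ∨ s = 1 := by
  unfold pvRank at h; split_ifs at h <;> first | tauto | omega

theorem pvRank_le2 (s : Int) (h : pvRank s ≤ 2) : s = 104 ∨ s = 1 ∨ s = 103 := by
  unfold pvRank at h; split_ifs at h <;> first | tauto | omega

theorem pvRank_le3 (s : Int) (h : pvRank s ≤ 3) : s = 104 ∨ s = 1 ∨ s = 103 ∨ s = 100 := by
  unfold pvRank at h; split_ifs at h <;> first | tauto | omega

-- the argmin fold reproduces A's break-loop over the priority list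
theorem pvStimulus_eq (sensors : List Int) :
    pvFindStimulus pvPrioritas sensors
    = (let M := sensors.foldl (fun b s => if pvRank s < b then pvRank s else b) 4
       if M < 4 then PySem.List.pyGet? pvPrioritas M else none) := by
  set M := sensors.foldl (fun b s => if pvRank s < b then pvRank s else b) 4 with hM
  have hle : ∀ k, M ≤ k ↔ (4 : Int) ≤ k ∨ ∃ s ∈ sensors, pvRank s ≤ k := fun k =>
    pvMinFold_le sensors 4 k
  have hnn : 0 ≤ M := by
    by_contra h
    rcases (hle (-1)).1 (by omega) with h4 | ⟨s, _, hr⟩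
    · omega
    · have := pvRank_nonneg s; omega
  by_cases h104 : (104 : Int) ∈ sensors
  · have h0 : M ≤ 0 := (hle 0).2 (Or.inr ⟨104, h104, by simp [pvRank]⟩)
    have : M = 0 := le_antisymm h0 hnn
    simp [pvFindStimulus, pvPrioritas, h104, this, PySem.List.pyGet?, PySem.List.pyIdx?]
  · have hn0 : ¬ M ≤ 0 := by
      intro h
      rcases (hle 0).1 h with h4 | ⟨s, hs, hr⟩
      · omega
      · exact h104 ((pvRank_le0 s hr) ▸ hs)
    by_cases h1 : (1 : Int) ∈ sensors
    · have hle1 : M ≤ 1 := (hle 1).2 (Or.inr ⟨1, h1, by simp [pvRank]⟩)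
      have : M = 1 := by omega
      simp [pvFindStimulus, pvPrioritas, h104, h1, this, PySem.List.pyGet?, PySem.List.pyIdx?]
    · have hn1 : ¬ M ≤ 1 := by
        intro h
        rcases (hle 1).1 h with h4 | ⟨s, hs, hr⟩
        · omega
        · rcases pvRank_le1 s hr with rfl | rfl <;> tauto
      by_cases h103 : (103 : Int) ∈ sensors
      · have hle2 : M ≤ 2 := (hle 2).2 (Or.inr ⟨103, h103, by simp [pvRank]⟩)
        have : M = 2 := by omega
        simp [pvFindStimulus, pvPrioritas, h104, h1, h103, this, PySem.List.pyGet?, PySem.List.pyIdx?]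
      · have hn2 : ¬ M ≤ 2 := by
          intro h
          rcases (hle 2).1 h with h4 | ⟨s, hs, hr⟩
          · omega
          · rcases pvRank_le2 s hr with rfl | rfl | rfl <;> tauto
        by_cases h100 : (100 : Int) ∈ sensors
        · have hle3 : M ≤ 3 := (hle 3).2 (Or.inr ⟨100, h100, by simp [pvRank]⟩)
          have : M = 3 := by omega
          simp [pvFindStimulus, pvPrioritas, h104, h1, h103, h100, this, PySem.List.pyGet?, PySem.List.pyIdx?]
        · have hn3 : ¬ M ≤ 3 := by
            intro h
            rcases (hle 3).1 h with h4 | ⟨s, hs, hr⟩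
            · omega
            · rcases pvRank_le3 s hr with rfl | rfl | rfl | rfl <;> tauto
          have h4 : ¬ M < 4 := by omega
          simp [pvFindStimulus, pvPrioritas, h104, h1, h103, h100, h4]

-- ===== VERDICT =====
theorem parse_sensors_py_spec : Claim_equal_parse_sensors_py := by
  intro sensors _
  unfold Spec_parse_sensors_py parse_sensors_py parse_sensors_py_alt
  rw [pvPairFold_split]
  exact Prod.ext (pvStimulus_eq sensors) rfl
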